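-- pv_equiv track=rewrite | github.com/Quickstilver/code2vec-path-extractor | ast_parso.py | concatenate_paths
-- ===== SOURCE A (Python) =====
-- def concatenate_paths(paths):
--     concatenated = []
--
--     for path1, path2 in paths:
--         new_path = []
--         for node in path1[:-1]:
--             new_path.append(node)
--             new_path.append('->')
--         for node in path2:
--             new_path.append(node)
--             new_path.append('<-')
--         # Remove the last added direction arrow (either '->' or '<-') since it's not needed
--         new_path = new_path[:-1]
--         concatenated.append(new_path)
--
--     return concatenated
-- ===== SOURCE B (Python) =====
-- def concatenate_paths(paths):
--     out = []
--     for path1, path2 in paths: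
--         # Build the interleaved path back-to-front: walk both parts in reverse and
--         # emit a direction arrow only when some output already follows, so no
--         # trailing arrow is ever produced or trimmed.
--         rev = []
--         for node in reversed(path2):
--             if rev:
--                 rev.append('<-')
--             rev.append(node)
--         for node in reversed(path1[:-1]):
--             if rev:
--                 rev.append('->')
--             rev.append(node)
--         rev.reverse()
--         out.append(rev)
--     return out
-- ===== Notes on version B (the rewrite author's own statement) =====
-- stated objective: alternative
-- what changed: Replaced A's build-then-trim strategy (append every node followed by its arrow, then slice off the trailing arrow) by a back-to-front construction that walks both path parts in reverse, emits an arrow only when output already follows, and reverses once at the end, so no trailing element is ever produced or removed.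
import Mathlib
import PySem

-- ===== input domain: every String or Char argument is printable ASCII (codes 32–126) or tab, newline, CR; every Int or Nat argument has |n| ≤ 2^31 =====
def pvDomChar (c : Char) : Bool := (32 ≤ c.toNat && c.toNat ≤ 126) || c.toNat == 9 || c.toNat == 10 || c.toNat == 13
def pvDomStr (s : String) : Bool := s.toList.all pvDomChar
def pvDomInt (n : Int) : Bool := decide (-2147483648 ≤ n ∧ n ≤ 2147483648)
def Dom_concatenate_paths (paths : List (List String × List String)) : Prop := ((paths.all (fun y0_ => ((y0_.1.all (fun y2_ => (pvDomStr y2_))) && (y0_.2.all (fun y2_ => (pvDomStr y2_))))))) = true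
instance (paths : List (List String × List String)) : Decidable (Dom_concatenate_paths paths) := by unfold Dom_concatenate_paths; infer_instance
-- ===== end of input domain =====

-- B builds each interleaved path back-to-front (arrow emitted only when output already
-- follows, single final reverse) instead of A's append-arrow-after-every-node loops
-- followed by a trailing [:-1] trim.

-- ===== PORT A =====
def concatenate_paths (paths : List (List String × List String)) : List (List String) :=
  paths.foldl (fun concatenated p =>
    let new_path : List String :=
      (PySem.List.slice p.1 none (some (-1))).foldl (fun a node => a ++ [node, "->"]) []
    let new_path := p.2.foldl (fun a node => a ++ [node, "<-"]) new_path
    let new_path := PySem.List.slice new_path none (some (-1))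
    concatenated ++ [new_path]) []

-- ===== PORT B =====
def concatenate_paths_alt (paths : List (List String × List String)) : List (List String) :=
  paths.foldl (fun out p =>
    let rev : List String :=
      p.2.reverse.foldl (fun rev node => (if rev = [] then rev else rev ++ ["<-"]) ++ [node]) []
    let rev :=
      (PySem.List.slice p.1 none (some (-1))).reverse.foldl
        (fun rev node => (if rev = [] then rev else rev ++ ["->"]) ++ [node]) rev
    out ++ [rev.reverse]) []

-- ===== PRECONDITION & SPEC =====
def Spec_concatenate_paths (paths : List (List String × List String)) (out : List (List String)) : Prop := out = concatenate_paths_alt paths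
instance (paths : List (List String × List String)) (out : List (List String)) : Decidable (Spec_concatenate_paths paths out) := by unfold Spec_concatenate_paths; infer_instance

-- ===== CLAIM =====
def Claim_equal_concatenate_paths : Prop := ∀ (paths : List (List String × List String)), Dom_concatenate_paths paths → Spec_concatenate_paths paths (concatenate_paths paths)

-- ===== LEMMAS AND PROOFS =====
-- join l s = l interleaved with s BETWEEN consecutive elements (no trailing s)
def pvJoin (l : List String) (s : String) : List String :=
  match l with
  | [] => []
  | c :: cs => c :: cs.flatMap (fun n => [s, n])

theorem pv_foldl_pairs (l : List String) (sep : String) (acc : List String) :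
    l.foldl (fun a node => a ++ [node, sep]) acc = acc ++ l.flatMap (fun n => [n, sep]) := by
  induction l generalizing acc with
  | nil => simp
  | cons x xs ih => simp [List.foldl, ih]

theorem pv_outer (paths : List (List String × List String)) (g : List String × List String → List String) (acc : List (List String)) :
    paths.foldl (fun c p => c ++ [g p]) acc = acc ++ paths.map g := by
  induction paths generalizing acc with
  | nil => simp
  | cons x xs ih => simp [List.foldl, ih]

theorem pv_fold_ne (l : List String) (sep : String) (acc : List String) (h : acc ≠ []) :
    l.foldl (fun rev node => (if rev = [] then rev else rev ++ [sep]) ++ [node]) acc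
      = acc ++ l.flatMap (fun n => [sep, n]) := by
  induction l generalizing acc with
  | nil => simp
  | cons c cs ih =>
      rw [List.foldl_cons, if_neg h, ih _ (by simp)]
      simp

theorem pv_fold_nil (l : List String) (sep : String) :
    l.foldl (fun rev node => (if rev = [] then rev else rev ++ [sep]) ++ [node]) []
      = pvJoin l sep := by
  cases l with
  | nil => rfl
  | cons c cs =>
      rw [List.foldl_cons, if_pos rfl, List.nil_append, pv_fold_ne cs sep [c] (by simp)]
      rfl

theorem pv_join_ne_nil (m : List String) (s : String) (h : m ≠ []) : pvJoin m s ≠ [] := by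
  cases m with
  | nil => exact absurd rfl h
  | cons c cs => simp [pvJoin]

theorem pv_dropLast_interleave (m : List String) (s : String) :
    (m.flatMap (fun n => [n, s])).dropLast = pvJoin m s := by
  induction m with
  | nil => rfl
  | cons c cs ih =>
      cases cs with
      | nil => rfl
      | cons d ds =>
          simp only [List.flatMap_cons, List.cons_append, List.nil_append] at ih ⊢
          rw [List.dropLast_cons₂, List.dropLast_cons₂, ih]
          simp [pvJoin]

theorem pv_join_snoc (m : List String) (a s : String) :
    pvJoin (m ++ [a]) s = (if m = [] then [] else pvJoin m s ++ [s]) ++ [a] := by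
  cases m with
  | nil => rfl
  | cons c cs => simp [pvJoin, List.flatMap_append]

theorem pv_reverse_join (m : List String) (s : String) :
    (pvJoin m.reverse s).reverse = pvJoin m s := by
  induction m with
  | nil => rfl
  | cons a m ih =>
      cases m with
      | nil => simp [pvJoin]
      | cons b m' =>
          rw [List.reverse_cons, pv_join_snoc, if_neg (by simp)]
          rw [List.reverse_append, List.reverse_append]
          simp only [List.reverse_cons, List.reverse_nil, List.nil_append, List.cons_append]
          rw [List.reverse_cons] at ih
          rw [ih]
          simp [pvJoin]

theorem pv_pair (p1' p2 : List String) :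
    (p1'.reverse.foldl
        (fun rev node => (if rev = [] then rev else rev ++ ["->"]) ++ [node])
        (p2.reverse.foldl (fun rev node => (if rev = [] then rev else rev ++ ["<-"]) ++ [node]) [])).reverse
      = (p1'.flatMap (fun n => [n, "->"]) ++ p2.flatMap (fun n => [n, "<-"])).dropLast := by
  rw [pv_fold_nil]
  cases hp2 : p2 with
  | nil =>
      simp only [List.reverse_nil]
      rw [show pvJoin [] "<-" = [] from rfl, pv_fold_nil, pv_reverse_join]
      simp [pv_dropLast_interleave]
  | cons c cs =>
      rw [← hp2]
      have h2 : p2 ≠ [] := by rw [hp2]; simp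
      have hne : pvJoin p2.reverse "<-" ≠ [] := pv_join_ne_nil _ _ (by simp [h2])
      rw [pv_fold_ne _ _ _ hne, List.reverse_append, pv_reverse_join,
        List.reverse_flatMap, List.reverse_reverse]
      have hF2 : p2.flatMap (fun n => [n, "<-"]) ≠ [] := by
        rw [hp2]; simp
      rw [List.dropLast_append_of_ne_nil hF2, pv_dropLast_interleave]
      simp [Function.comp_def]

-- ===== VERDICT =====
theorem concatenate_paths_spec : Claim_equal_concatenate_paths := by
  intro paths _
  unfold Spec_concatenate_paths concatenate_paths concatenate_paths_alt
  rw [pv_outer, pv_outer, List.nil_append, List.nil_append]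
  apply List.map_congr_left
  intro p _
  dsimp only
  rw [pv_foldl_pairs, pv_foldl_pairs, List.nil_append, PySem.List.slice_to_neg_one,
    PySem.List.slice_to_neg_one]
  rw [pv_pair p.1.dropLast p.2]
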